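-- pv_equiv track=rewrite | github.com/xen-project/xen | xen/tools/gen-cpuid.py | featureset_to_uint32s
-- ===== SOURCE A (Python) =====
-- def featureset_to_uint32s(fs, nr):
--     """ Represent a featureset as a list of C-compatible uint32_t's """
--
--     bitmap = 0
--     for f in fs:
--         bitmap |= 1 << f
--
--     words = []
--     while bitmap:
--         words.append(bitmap & ((1 << 32) - 1))
--         bitmap >>= 32
--
--     assert len(words) <= nr
--
--     if len(words) < nr:
--         words.extend([0] * (nr - len(words)))
--
--     return ("0x%08xU" % x for x in words)
-- ===== SOURCE B (Python) =====
-- def featureset_to_uint32s(fs, nr):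
--     """ Represent a featureset as a list of C-compatible uint32_t's """
--
--     words = [0] * nr
--     for f in fs:
--         words[f // 32] |= 1 << (f % 32)
--
--     return ("0x%08xU" % x for x in words)
-- ===== Notes on version B (the rewrite author's own statement) =====
-- stated objective: idiomatic
-- what changed: B allocates the nr-word array up front and sets bit f%32 of word f//32 directly, instead of accumulating one unbounded big integer and chunking it 32 bits at a time in a while loop.
import Mathlib
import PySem

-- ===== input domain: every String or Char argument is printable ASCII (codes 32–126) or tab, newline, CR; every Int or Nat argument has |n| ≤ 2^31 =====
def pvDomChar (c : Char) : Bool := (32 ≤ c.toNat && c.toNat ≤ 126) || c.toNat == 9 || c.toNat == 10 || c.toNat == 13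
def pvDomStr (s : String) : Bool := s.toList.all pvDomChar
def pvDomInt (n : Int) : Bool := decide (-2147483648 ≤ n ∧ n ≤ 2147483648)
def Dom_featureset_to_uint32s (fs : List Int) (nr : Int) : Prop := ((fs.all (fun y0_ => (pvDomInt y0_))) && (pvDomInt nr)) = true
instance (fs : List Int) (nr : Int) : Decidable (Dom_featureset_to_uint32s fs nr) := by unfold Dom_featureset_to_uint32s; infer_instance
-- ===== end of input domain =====

-- B replaces A's big-integer accumulation + 32-bit chunking loop by a preallocated
-- nr-word array filled bit by bit; equal output proved on Pre_ (the inputs where A's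
-- shifts and assert succeed).

-- ===== PORT A =====

-- "0x%08xU" % x for 0 ≤ x < 2^32 (exactly 8 lowercase hex digits); shared formatting helper
def pvHexDigit (n : Nat) : Char := if n < 10 then Char.ofNat (48 + n) else Char.ofNat (87 + n)
def pvHex8 (x : Nat) : String :=
  "0x" ++ String.ofList ((List.range 8).map (fun i => pvHexDigit ((x >>> (4 * (7 - i))) &&& 15))) ++ "U"

-- the 'while bitmap:' loop of A
def pvChunk (b : Nat) : List Nat :=
  if _h : b = 0 then [] else (b &&& 4294967295) :: pvChunk (b >>> 32)
termination_by b
decreasing_by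
  simp only [Nat.shiftRight_eq_div_pow]
  exact Nat.div_lt_self (Nat.pos_of_ne_zero _h) (by norm_num)

def featureset_to_uint32s (fs : List Int) (nr : Int) : List String :=
  -- bitmap |= 1 << f  (Pre_ gives 0 ≤ f, so the Int features live in Nat)
  let bitmap : Nat := fs.foldl (fun b f => b ||| (1 <<< f.toNat)) 0
  let words := pvChunk bitmap
  let words := words ++ List.replicate (nr.toNat - words.length) 0
  words.map pvHex8

-- ===== PORT B =====
def featureset_to_uint32s_alt (fs : List Int) (nr : Int) : List String :=
  -- words = [0] * nr;  words[f // 32] |= 1 << (f % 32)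
  let words : List Int :=
    fs.foldl (fun ws f =>
      let i := PySem.Int.floordiv f 32
      PySem.List.pySetD ws i
        (PySem.Int.bor (PySem.List.pyGetD ws i 0) ((1 : Int) <<< (PySem.Int.mod f 32).toNat)))
      (List.replicate nr.toNat 0)
  words.map (fun x => pvHex8 x.toNat)

-- ===== PRECONDITION & SPEC =====
-- exactly the inputs on which A returns: every shift distance f is nonnegative
-- (else Python raises ValueError) and every bit fits in nr words, i.e. the assert
-- 'len(words) <= nr' holds (else AssertionError); nr ≥ 0 is the fs = [] case of the assert.
def Pre_featureset_to_uint32s (fs : List Int) (nr : Int) : Prop :=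
  0 ≤ nr ∧ ∀ f ∈ fs, 0 ≤ f ∧ f < 32 * nr
instance (fs : List Int) (nr : Int) : Decidable (Pre_featureset_to_uint32s fs nr) := by
  unfold Pre_featureset_to_uint32s; infer_instance

def pvWitness_featureset_to_uint32s : List Int × Int := ([0, 5, 33], 2)

def Spec_featureset_to_uint32s (fs : List Int) (nr : Int) (out : List String) : Prop := out = featureset_to_uint32s_alt fs nr
instance (fs : List Int) (nr : Int) (out : List String) : Decidable (Spec_featureset_to_uint32s fs nr out) := by unfold Spec_featureset_to_uint32s; infer_instance

-- ===== CLAIM (what is proved, stated in full; the proofs are below) =====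
def Claim_equal_featureset_to_uint32s : Prop := ∀ (fs : List Int) (nr : Int), Dom_featureset_to_uint32s fs nr → Pre_featureset_to_uint32s fs nr → Spec_featureset_to_uint32s fs nr (featureset_to_uint32s fs nr)

-- ===== LEMMAS AND PROOFS =====

-- word j of a bitmap
def pvWord (b : Nat) (j : Nat) : Nat := (b >>> (32 * j)) &&& 4294967295

lemma pvWord_testBit (b j k : Nat) :
    (pvWord b j).testBit k = (decide (k < 32) && b.testBit (32 * j + k)) := by
  simp only [pvWord, Nat.testBit_and, Nat.testBit_shiftRight]
  rw [show (4294967295 : Nat) = 2 ^ 32 - 1 from by norm_num, Nat.testBit_two_pow_sub_one,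
    Bool.and_comm, Nat.add_comm]

-- setting bit f of the bitmap changes exactly word f / 32
lemma pvWord_or_pow (b f j : Nat) :
    pvWord (b ||| 2 ^ f) j =
      if j = f / 32 then pvWord b j ||| 2 ^ (f % 32) else pvWord b j := by
  apply Nat.eq_of_testBit_eq
  intro k
  by_cases hb : b.testBit (32 * j + k) <;>
    by_cases hk : k < 32 <;>
      split_ifs with hj <;>
        simp [pvWord_testBit, Nat.testBit_or, Nat.testBit_two_pow, hb, hk] <;>
          omega

-- list whose getD agrees pointwise with g below its length nw is (range nw).map g
lemma pv_eq_range_map {ws : List Int} {nw : Nat} {g : Nat → Int}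
    (hl : ws.length = nw) (hp : ∀ j < nw, ws.getD j 0 = g j) :
    ws = (List.range nw).map g := by
  apply List.ext_getElem (by simp [hl])
  intro i h1 h2
  have hi : i < nw := by simpa [hl] using h1
  have := hp i hi
  rw [List.getD_eq_getElem ws 0 h1] at this
  simpa using this

-- 1 << k over Int is the cast of the Nat power
lemma pv_one_shl (k : Nat) : (1 : Int) <<< k = ((2 ^ k : Nat) : Int) := by
  rw [Int.shiftLeft_eq]; push_cast; ring

-- B's update step, for a nonnegative feature, is a plain in-range List.set
lemma pv_step_eq (ws : List Int) (f : Int) (hf : 0 ≤ f) :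
    PySem.List.pySetD ws (PySem.Int.floordiv f 32)
      (PySem.Int.bor (PySem.List.pyGetD ws (PySem.Int.floordiv f 32) 0)
        ((1 : Int) <<< (PySem.Int.mod f 32).toNat))
    = ws.set (f.toNat / 32)
        (PySem.Int.bor (ws.getD (f.toNat / 32) 0) ((1 : Int) <<< (f.toNat % 32))) := by
  have hi : PySem.Int.floordiv f 32 = ((f.toNat / 32 : Nat) : Int) := by
    rw [PySem.Int.floordiv_eq_ediv_of_pos (by norm_num)]; omega
  have hm : (PySem.Int.mod f 32).toNat = f.toNat % 32 := by
    rw [PySem.Int.mod_eq_emod_of_pos (by norm_num)]; omega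
  rw [hi, hm]
  simp only [PySem.List.pySetD_natCast, PySem.List.pyGetD_natCast]

-- invariant of B's fold versus A's bitmap fold
lemma pv_fold_inv (nw : Nat) :
    ∀ (fs : List Int) (b : Nat) (ws : List Int),
      (∀ f ∈ fs, 0 ≤ f ∧ f < 32 * (nw : Int)) →
      ws.length = nw →
      (∀ j < nw, ws.getD j 0 = ((pvWord b j : Nat) : Int)) →
      (fs.foldl (fun ws f =>
          let i := PySem.Int.floordiv f 32
          PySem.List.pySetD ws i
            (PySem.Int.bor (PySem.List.pyGetD ws i 0)
              ((1 : Int) <<< (PySem.Int.mod f 32).toNat))) ws).length = nw ∧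
      ∀ j < nw,
        (fs.foldl (fun ws f =>
            let i := PySem.Int.floordiv f 32
            PySem.List.pySetD ws i
              (PySem.Int.bor (PySem.List.pyGetD ws i 0)
                ((1 : Int) <<< (PySem.Int.mod f 32).toNat))) ws).getD j 0 =
          ((pvWord (fs.foldl (fun b f => b ||| (1 <<< f.toNat)) b) j : Nat) : Int) := by
  intro fs
  induction fs with
  | nil => intro b ws _ hl hp; exact ⟨hl, hp⟩
  | cons f fs ih =>
    intro b ws hf hl hp
    have hf0 := hf f (by simp)
    have hi : f.toNat / 32 < nw := by omega
    simp only [List.foldl_cons, pv_step_eq ws f hf0.1]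
    apply ih
    · intro g hg; exact hf g (by simp [hg])
    · simp [hl]
    · intro j hj
      have hjlen : j < ws.length := hl ▸ hj
      have hset : (ws.set (f.toNat / 32)
            (PySem.Int.bor (ws.getD (f.toNat / 32) 0) ((1 : Int) <<< (f.toNat % 32)))).getD j 0
          = if j = f.toNat / 32
            then PySem.Int.bor (ws.getD (f.toNat / 32) 0) ((1 : Int) <<< (f.toNat % 32))
            else ws.getD j 0 := by
        rw [List.getD_eq_getElem _ 0 (by simpa using hjlen)]
        rw [List.getElem_set]
        split_ifs with h1 h2 h3
        · rfl
        · omega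
        · omega
        · rw [List.getD_eq_getElem _ 0 hjlen]
      rw [hset]
      have hshift : (1 <<< f.toNat : Nat) = 2 ^ f.toNat := Nat.one_shiftLeft _
      rw [hshift, pvWord_or_pow]
      split_ifs with h1
      · rw [hp _ hi, h1, pv_one_shl, PySem.Int.bor_natCast]
      · rw [hp _ hj]

-- the chunk-then-pad of A equals the word table, given the bitmap fits in nw words
lemma pv_chunk_pad (nw : Nat) :
    ∀ b : Nat, b < 2 ^ (32 * nw) →
      pvChunk b ++ List.replicate (nw - (pvChunk b).length) 0 =
        (List.range nw).map (pvWord b) := by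
  induction nw with
  | zero =>
    intro b hb
    norm_num at hb
    subst hb
    rw [pvChunk]
    simp
  | succ n ih =>
    intro b hb
    by_cases hb0 : b = 0
    · subst hb0
      have hz : ∀ j : Nat, pvWord 0 j = 0 := fun j => by simp [pvWord]
      rw [pvChunk, dif_pos rfl]
      simp only [List.nil_append, List.length_nil, Nat.sub_zero]
      symm
      rw [List.eq_replicate_iff]
      simp [hz]
    · rw [pvChunk, dif_neg hb0]
      have hlt : b >>> 32 < 2 ^ (32 * n) := by
        rw [Nat.shiftRight_eq_div_pow]
        apply Nat.div_lt_of_lt_mul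
        calc b < 2 ^ (32 * (n + 1)) := hb
          _ = 2 ^ (32 * n) * 2 ^ 32 := by rw [← pow_add]; ring_nf
          _ = 2 ^ 32 * 2 ^ (32 * n) := by ring
      have := ih (b >>> 32) hlt
      rw [List.range_succ_eq_map, List.map_cons, List.map_map]
      have hw0 : pvWord b 0 = b &&& 4294967295 := by simp [pvWord]
      rw [← hw0]
      simp only [List.length_cons]
      have hlen : n + 1 - ((pvChunk (b >>> 32)).length + 1) = n - (pvChunk (b >>> 32)).length := by omega
      rw [hlen, List.cons_append, this]
      congr 1
      apply List.map_congr_left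
      intro j _
      simp only [Function.comp, pvWord, ← Nat.shiftRight_add]
      congr 2
      omega

-- the bitmap built from features below 32*nw fits in nw words
lemma pv_bitmap_lt (nw : Nat) :
    ∀ (fs : List Int) (b : Nat), b < 2 ^ (32 * nw) →
      (∀ f ∈ fs, 0 ≤ f ∧ f < 32 * (nw : Int)) →
      fs.foldl (fun b f => b ||| (1 <<< f.toNat)) b < 2 ^ (32 * nw) := by
  intro fs
  induction fs with
  | nil => intro b hb _; simpa using hb
  | cons f fs ih =>
    intro b hb hf
    have hf0 := hf f (by simp)
    simp only [List.foldl_cons]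
    apply ih
    · apply Nat.or_lt_two_pow hb
      rw [Nat.one_shiftLeft]
      apply Nat.pow_lt_pow_right (by norm_num)
      omega
    · intro g hg; exact hf g (by simp [hg])

-- ===== VERDICT (by name: the statement is the Claim_ definition above) =====
theorem featureset_to_uint32s_spec : Claim_equal_featureset_to_uint32s := by
  intro fs nr _hdom hpre
  obtain ⟨hnr, hf⟩ := hpre
  unfold Spec_featureset_to_uint32s
  simp only [featureset_to_uint32s, featureset_to_uint32s_alt]
  set nw := nr.toNat with hnw
  have hf' : ∀ f ∈ fs, 0 ≤ f ∧ f < 32 * (nw : Int) := by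
    intro f hfm
    have := hf f hfm
    exact ⟨this.1, by have := this.2; omega⟩
  have hb : fs.foldl (fun b f => b ||| (1 <<< f.toNat)) 0 < 2 ^ (32 * nw) :=
    pv_bitmap_lt nw fs 0 (by positivity) hf'
  have hinv := pv_fold_inv nw fs 0 (List.replicate nw 0) hf' (by simp)
    (by intro j hj; simp [pvWord])
  rw [pv_chunk_pad nw _ hb, pv_eq_range_map hinv.1 hinv.2]
  simp [List.map_map, Function.comp]
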